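-- pv_equiv track=rewrite | github.com/houweidong/distillation | models/mobilenetv3.py | get_resolution_for_layers
-- ===== SOURCE A (Python) =====
-- def get_resolution_for_layers(cfgs, layers):
--     resolution = {}
--     resolution_temp = 224 // 2
--     for i, cfg in enumerate(cfgs):
--         if cfg[-1] == 2:
--             resolution_temp //= 2
--         if i+1 in layers:
--             resolution[i+1] = resolution_temp
--     return resolution
-- ===== SOURCE B (Python) =====
-- def get_resolution_for_layers(cfgs, layers):
--     # Sort-then-scan: walk the sorted distinct in-range layers with a single
--     # pointer into cfgs, advancing (and halving) only as far as each layer needs.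
--     n = len(cfgs)
--     resolution = {}
--     res = 112
--     pos = 0
--     for l in sorted({l for l in layers if 1 <= l <= n}):
--         while pos < l:
--             if cfgs[pos][-1] == 2:
--                 res //= 2
--             pos += 1
--         resolution[l] = res
--     return resolution
-- ===== Notes on version B (the rewrite author's own statement) =====
-- stated objective: faster
-- what changed: A walks all of cfgs with a running-resolution accumulator and a per-index list membership test; B instead sorts the distinct in-range requested layers once and does a two-pointer scan driven by the layers, advancing a single cursor into cfgs only as far as each layer needs (cfgs beyond the largest requested layer are never visited, and no per-index membership scan remains).
-- outside the precondition, e.g. on get_resolution_for_layers([[]], [1]): A raises IndexError, B raises IndexError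
import Mathlib
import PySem

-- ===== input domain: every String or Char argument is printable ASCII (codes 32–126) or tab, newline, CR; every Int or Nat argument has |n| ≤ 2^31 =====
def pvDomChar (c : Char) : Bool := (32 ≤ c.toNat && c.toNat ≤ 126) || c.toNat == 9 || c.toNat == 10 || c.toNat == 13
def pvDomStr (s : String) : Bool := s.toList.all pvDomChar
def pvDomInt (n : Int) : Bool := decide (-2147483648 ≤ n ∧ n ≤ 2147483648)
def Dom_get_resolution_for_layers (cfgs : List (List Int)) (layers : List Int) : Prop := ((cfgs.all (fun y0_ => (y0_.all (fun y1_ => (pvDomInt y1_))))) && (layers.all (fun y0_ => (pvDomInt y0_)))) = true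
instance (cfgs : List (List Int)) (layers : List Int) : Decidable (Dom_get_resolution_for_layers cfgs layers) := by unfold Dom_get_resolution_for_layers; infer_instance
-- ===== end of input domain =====

-- B replaces A's full walk over cfgs (running resolution + per-index membership test) by a
-- sort-then-two-pointer scan driven by the sorted distinct in-range requested layers (measured faster).


-- ===== PORT A =====
-- the 'for i, cfg in enumerate(cfgs)' loop, carrying (index, resolution_temp, dict);
-- cfg[-1] is pyGet? with default 0, taken only when cfg = [] (IndexError, excluded by Pre_)
def pvGoA (layers : List Int) (cfgs : List (List Int)) (i : Int) (rt : Int)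
    (d : PySem.Dict Int Int) : PySem.Dict Int Int :=
  match cfgs with
  | [] => d
  | cfg :: rest =>
      let rt' := if (PySem.List.pyGet? cfg (-1)).getD 0 = 2 then PySem.Int.floordiv rt 2 else rt
      let d' := if (i + 1) ∈ layers then d.insert (i + 1) rt' else d
      pvGoA layers rest (i + 1) rt' d'

def get_resolution_for_layers (cfgs : List (List Int)) (layers : List Int) : List (Int × Int) :=
  (pvGoA layers cfgs 0 (PySem.Int.floordiv 224 2) PySem.Dict.empty).items

-- ===== PORT B =====
-- the 'while pos < l' loop: it runs exactly (l - pos) times (pos increases by 1 each turn),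
-- so it is ported with that fuel; cfgs[pos] / cfg[-1] are pyGet? with defaults, taken only outside Pre_
def pvAdvance (cfgs : List (List Int)) (pos : Int) (res : Int) : Nat → Int × Int
  | 0 => (pos, res)
  | s + 1 =>
      let cfg := (PySem.List.pyGet? cfgs pos).getD []
      let res' := if (PySem.List.pyGet? cfg (-1)).getD 0 = 2 then PySem.Int.floordiv res 2 else res
      pvAdvance cfgs (pos + 1) res' s

-- the 'for l in sorted({…})' loop, carrying (pos, res, dict)
def pvGoB (cfgs : List (List Int)) (ls : List Int) (pos : Int) (res : Int)
    (d : PySem.Dict Int Int) : PySem.Dict Int Int :=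
  match ls with
  | [] => d
  | l :: rest =>
      let pr := pvAdvance cfgs pos res (l - pos).toNat
      pvGoB cfgs rest pr.1 pr.2 (d.insert l pr.2)

def get_resolution_for_layers_alt (cfgs : List (List Int)) (layers : List Int) : List (Int × Int) :=
  let n : Int := cfgs.length
  let ls := PySem.List.sorted
      (PySem.Set.ofList (layers.filter (fun l => decide (1 ≤ l) && decide (l ≤ n))))
      (fun x => x) false
  (pvGoB cfgs ls 0 112 PySem.Dict.empty).items

-- ===== PRECONDITION & SPEC =====
-- Pre_ excludes exactly the inputs with an empty inner config, on which Python A raises IndexError at cfg[-1]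
def Pre_get_resolution_for_layers (cfgs : List (List Int)) (layers : List Int) : Prop :=
  ∀ cfg ∈ cfgs, cfg ≠ []
instance (cfgs : List (List Int)) (layers : List Int) : Decidable (Pre_get_resolution_for_layers cfgs layers) := by unfold Pre_get_resolution_for_layers; infer_instance

def pvWitness_get_resolution_for_layers : List (List Int) × List Int := ([[3, 1, 2], [5, 1]], [1, 2])

def Spec_get_resolution_for_layers (cfgs : List (List Int)) (layers : List Int) (out : List (Int × Int)) : Prop := out = get_resolution_for_layers_alt cfgs layers
instance (cfgs : List (List Int)) (layers : List Int) (out : List (Int × Int)) : Decidable (Spec_get_resolution_for_layers cfgs layers out) := by unfold Spec_get_resolution_for_layers; infer_instance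

-- ===== CLAIM (what is proved, stated in full; the proofs are below) =====
def Claim_equal_get_resolution_for_layers : Prop := ∀ (cfgs : List (List Int)) (layers : List Int), Dom_get_resolution_for_layers cfgs layers → Pre_get_resolution_for_layers cfgs layers → Spec_get_resolution_for_layers cfgs layers (get_resolution_for_layers cfgs layers)

-- ===== LEMMAS AND PROOFS =====

-- the stride-2 test on one config
def pvPred (cfg : List Int) : Bool := decide ((PySem.List.pyGet? cfg (-1)).getD 0 = 2)

-- number of stride-2 configs among the first k
def pvCnt (cfgs : List (List Int)) (k : Nat) : Nat := (cfgs.take k).countP pvPred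

-- prefixes count monotonically
lemma pvCnt_mono (cfgs : List (List Int)) {a b : Nat} (h : a ≤ b) :
    pvCnt cfgs a ≤ pvCnt cfgs b := by
  unfold pvCnt
  calc (cfgs.take a).countP pvPred
      = ((cfgs.take b).take a).countP pvPred := by
        rw [List.take_take, min_eq_left h]
    _ ≤ (cfgs.take b).countP pvPred := (List.take_sublist _ _).countP_le

lemma pvCnt_succ (cfg : List Int) (rest : List (List Int)) (k : Nat) :
    pvCnt (cfg :: rest) (k + 1) = (if pvPred cfg then 1 else 0) + pvCnt rest k := by
  simp only [pvCnt, List.take_succ_cons, List.countP_cons]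
  split_ifs <;> omega

-- A's loop, characterised: items = prefix ++ one pair per in-layers index, value 112 >> (prefix count)
lemma pvGoA_items (layers : List Int) (cfgs : List (List Int)) (i : Nat) (c : Nat)
    (d : PySem.Dict Int Int) (hd : ∀ k ∈ d.keys, k < (i : Int) + 1) :
    (pvGoA layers cfgs (i : Int) ((112 >>> c : Nat) : Int) d).items
      = d.items ++ (List.range cfgs.length).filterMap
          (fun j => if ((i + j + 1 : Nat) : Int) ∈ layers then
              some (((i + j + 1 : Nat) : Int), ((112 >>> (c + pvCnt cfgs (j + 1)) : Nat) : Int)) else none) := by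
  induction cfgs generalizing i c d with
  | nil => simp [pvGoA]
  | cons cfg rest ih =>
      have hcontains : d.contains ((i : Int) + 1) = false := by
        rw [PySem.Dict.contains_eq_decide_mem_keys, decide_eq_false_iff_not]
        intro hmem
        exact absurd (hd _ hmem) (lt_irrefl _)
      set c' : Nat := if pvPred cfg then c + 1 else c with hc'
      have hrt : (if (PySem.List.pyGet? cfg (-1)).getD 0 = 2 then
            PySem.Int.floordiv ((112 >>> c : Nat) : Int) 2 else ((112 >>> c : Nat) : Int))
          = ((112 >>> c' : Nat) : Int) := by
        rw [hc']
        by_cases h : (PySem.List.pyGet? cfg (-1)).getD 0 = 2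
        · simp [pvPred, h, Nat.shiftRight_succ]
        · simp [pvPred, h]
      have hcast : ((i : Int) + 1) = ((i + 1 : Nat) : Int) := by push_cast; ring
      have hstep : ∀ j : Nat, c + pvCnt (cfg :: rest) (j + 1 + 1) = c' + pvCnt rest (j + 1) := by
        intro j
        rw [pvCnt_succ, hc']
        split_ifs <;> omega
      have hhead : c + pvCnt (cfg :: rest) 1 = c' := by
        rw [pvCnt_succ, hc']
        have : pvCnt rest 0 = 0 := by simp [pvCnt]
        split_ifs <;> omega
      have hrange : (List.range (rest.length + 1)) = 0 :: (List.range rest.length).map Nat.succ :=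
        List.range_succ_eq_map
      simp only [pvGoA, hrt, List.length_cons, hrange, List.filterMap_cons, List.filterMap_map]
      by_cases hmem : ((i : Int) + 1) ∈ layers
      · have hmem' : ((i + 0 + 1 : Nat) : Int) ∈ layers := by
          simpa using hcast ▸ hmem
        rw [if_pos hmem]
        rw [hcast] at hcontains ⊢
        rw [ih (i + 1) c' (d.insert ((i + 1 : Nat) : Int) ((112 >>> c' : Nat) : Int))
            (by
              intro k hk
              rcases (PySem.Dict.mem_keys_insert _ _ _ _).mp hk with h | h
              · omega
              · have := hd _ h; push_cast at *; omega)]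
        rw [PySem.Dict.items_insert_of_not_contains _ _ hcontains]
        simp only [if_pos hmem', Function.comp_def, List.append_assoc, List.cons_append,
          List.nil_append, Nat.add_zero, Nat.zero_add, hhead]
        congr 2
        apply List.filterMap_congr
        intro j _
        have h1 : i + Nat.succ j + 1 = (i + 1) + j + 1 := by omega
        have h2 : Nat.succ j + 1 = j + 1 + 1 := rfl
        rw [h1, h2, hstep j]
      · have hmem' : ¬ ((i + 0 + 1 : Nat) : Int) ∈ layers := by
          simpa using hcast ▸ hmem
        rw [if_neg hmem, hcast]
        rw [ih (i + 1) c' d (by intro k hk; have := hd _ hk; push_cast at *; omega)]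
        simp only [if_neg hmem', Function.comp_def, hhead]
        congr 1
        apply List.filterMap_congr
        intro j _
        have h1 : i + Nat.succ j + 1 = (i + 1) + j + 1 := by omega
        rw [h1, show Nat.succ j + 1 = j + 1 + 1 from rfl, hstep j]

-- the while loop advances the cursor and keeps res = 112 >> count
lemma pvAdvance_spec (cfgs : List (List Int)) (p s : Nat) (c : Nat) (hps : p + s ≤ cfgs.length) :
    pvAdvance cfgs (p : Int) ((112 >>> c : Nat) : Int) s
      = (((p + s : Nat) : Int), ((112 >>> (c + (pvCnt cfgs (p + s) - pvCnt cfgs p)) : Nat) : Int)) := by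
  induction s generalizing p c with
  | zero => simp [pvAdvance]
  | succ s ih =>
      have hp : p < cfgs.length := by omega
      have hget : (PySem.List.pyGet? cfgs ((p : Nat) : Int)).getD [] = cfgs[p] := by
        rw [PySem.List.pyGet?_natCast, List.getElem?_eq_getElem hp]
        rfl
      have hsucc : pvCnt cfgs (p + 1) = pvCnt cfgs p + (if pvPred cfgs[p] then 1 else 0) := by
        unfold pvCnt
        rw [List.take_succ, List.countP_append, List.getElem?_eq_getElem hp]
        simp [List.countP_cons]
      set c'' : Nat := c + (if pvPred cfgs[p] then 1 else 0) with hc''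
      have hrt : (if (PySem.List.pyGet? cfgs[p] (-1)).getD 0 = 2 then
            PySem.Int.floordiv ((112 >>> c : Nat) : Int) 2 else ((112 >>> c : Nat) : Int))
          = ((112 >>> c'' : Nat) : Int) := by
        rw [hc'']
        by_cases h : (PySem.List.pyGet? cfgs[p] (-1)).getD 0 = 2
        · simp [pvPred, h, Nat.shiftRight_succ]
        · simp [pvPred, h]
      have hcast : ((p : Nat) : Int) + 1 = ((p + 1 : Nat) : Int) := by push_cast; ring
      simp only [pvAdvance, hget, hrt, hcast]
      rw [ih (p + 1) c'' (by omega)]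
      have hmono : pvCnt cfgs (p + 1) ≤ pvCnt cfgs (p + 1 + s) :=
        pvCnt_mono cfgs (by omega)
      have h2 : p + 1 + s = p + (s + 1) := by omega
      rw [h2] at hmono
      rw [h2]
      have harith : c'' + (pvCnt cfgs (p + (s + 1)) - pvCnt cfgs (p + 1))
          = c + (pvCnt cfgs (p + (s + 1)) - pvCnt cfgs p) := by
        by_cases hpp : pvPred cfgs[p]
        · simp only [hpp, if_pos] at hc'' hsucc; omega
        · simp only [hpp] at hc'' hsucc; simp at hc'' hsucc; omega
      rw [harith]

lemma pvGoB_items (cfgs : List (List Int)) (ls : List Int) (p : Nat) (c : Nat)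
    (hc : c = pvCnt cfgs p)
    (hls : ls.Pairwise (· < ·))
    (hin : ∀ l ∈ ls, (p : Int) ≤ l ∧ l ≤ (cfgs.length : Int))
    (d : PySem.Dict Int Int) (hd : ∀ k ∈ d.keys, ∀ l ∈ ls, k < l) :
    (pvGoB cfgs ls (p : Int) ((112 >>> c : Nat) : Int) d).items
      = d.items ++ ls.map (fun l => (l, ((112 >>> pvCnt cfgs l.toNat : Nat) : Int))) := by
  induction ls generalizing p c d with
  | nil => simp [pvGoB]
  | cons l rest ih =>
      obtain ⟨hpl, hln⟩ := hin l (by simp)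
      have h0 : 0 ≤ l := le_trans (by positivity) hpl
      obtain ⟨q, rfl⟩ := Int.eq_ofNat_of_zero_le h0
      have hpq : p ≤ q := by exact_mod_cast hpl
      have hqn : q ≤ cfgs.length := by exact_mod_cast hln
      have htn : ((q : Int) - (p : Int)).toNat = q - p := by omega
      have hpplus : p + (q - p) = q := by omega
      have hcq : c + (pvCnt cfgs q - pvCnt cfgs p) = pvCnt cfgs q := by
        have := pvCnt_mono cfgs hpq
        omega
      simp only [pvGoB, htn]
      rw [pvAdvance_spec cfgs p (q - p) c (by omega), hpplus, hcq]
      have hcont : d.contains ((q : Nat) : Int) = false := by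
        rw [PySem.Dict.contains_eq_decide_mem_keys, decide_eq_false_iff_not]
        intro hmem
        exact absurd (hd _ hmem _ (by simp)) (lt_irrefl _)
      have hlt : ∀ l' ∈ rest, ((q : Int)) < l' := by
        intro l' hl'
        exact (List.pairwise_cons.mp hls).1 l' hl'
      rw [ih q (pvCnt cfgs q) rfl (List.pairwise_cons.mp hls).2
          (by
            intro l' hl'
            refine ⟨le_of_lt (hlt l' hl'), (hin l' (by simp [hl'])).2⟩)
          (d.insert ((q : Nat) : Int) ((112 >>> pvCnt cfgs q : Nat) : Int))
          (by
            intro k hk l' hl'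
            rcases (PySem.Dict.mem_keys_insert _ _ _ _).mp hk with h | h
            · exact h ▸ hlt l' hl'
            · exact hd _ h _ (by simp [hl']))]
      rw [PySem.Dict.items_insert_of_not_contains _ _ hcont]
      simp [Int.toNat_natCast]

-- the in-layers indices, in increasing order, are pairwise increasing
lemma pvM_pairwise (cfgs : List (List Int)) (layers : List Int) :
    ((List.range cfgs.length).filterMap
      (fun j => if ((j + 1 : Nat) : Int) ∈ layers then some ((j + 1 : Nat) : Int) else none)).Pairwise
      (· < ·) := by
  refine List.Pairwise.filterMap _ ?_ List.pairwise_lt_range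
  intro a b hab x hx y hy
  split_ifs at hx hy with h1 h2
  · cases hx; cases hy
    exact_mod_cast Nat.succ_lt_succ hab

-- the sorted distinct in-range layers are exactly the in-layers indices in increasing order
lemma pv_sorted_layers (cfgs : List (List Int)) (layers : List Int) :
    PySem.List.sorted
        (PySem.Set.ofList (layers.filter (fun l => decide (1 ≤ l) && decide (l ≤ (cfgs.length : Int)))))
        (fun x => x) false
      = (List.range cfgs.length).filterMap
          (fun j => if ((j + 1 : Nat) : Int) ∈ layers then some ((j + 1 : Nat) : Int) else none) := by
  have hpairM := pvM_pairwise cfgs layers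
  apply PySem.List.sorted_eq_of_perm_of_pairwise_lt
  · rw [List.perm_ext_iff_of_nodup (hpairM.imp fun h => ne_of_lt h)
        (PySem.Set.nodup_ofList _)]
    intro a
    rw [PySem.Set.mem_ofList]
    simp only [List.mem_filterMap, List.mem_range, List.mem_filter, decide_eq_true_eq,
      Bool.and_eq_true]
    constructor
    · rintro ⟨j, hj, hx⟩
      split_ifs at hx with h
      · cases hx
        refine ⟨h, by omega, by exact_mod_cast Nat.succ_le_of_lt hj⟩
    · rintro ⟨hmem, h1, h2⟩
      refine ⟨a.toNat - 1, by omega, ?_⟩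
      have : ((a.toNat - 1 + 1 : Nat) : Int) = a := by omega
      rw [this, if_pos hmem]
  · exact hpairM

-- ===== VERDICT (by name: the statement is the Claim_ definition above) =====
theorem get_resolution_for_layers_spec : Claim_equal_get_resolution_for_layers := by
  intro cfgs layers _ _
  unfold Spec_get_resolution_for_layers get_resolution_for_layers get_resolution_for_layers_alt
  have h112 : PySem.Int.floordiv 224 2 = ((112 >>> 0 : Nat) : Int) := by decide
  rw [h112, show (0 : Int) = ((0 : Nat) : Int) from rfl,
    pvGoA_items layers cfgs 0 0 PySem.Dict.empty
      (by intro k hk; simp [PySem.Dict.keys_empty] at hk)]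
  simp only []
  rw [pv_sorted_layers cfgs layers]
  rw [show (112 : Int) = ((112 >>> 0 : Nat) : Int) from rfl,
    pvGoB_items cfgs _ 0 0 (by simp [pvCnt]) (pvM_pairwise cfgs layers)
      (by
        intro l hl
        obtain ⟨j, hj, hx⟩ := List.mem_filterMap.mp hl
        rw [List.mem_range] at hj
        split_ifs at hx with h
        · cases hx
          constructor
          · positivity
          · exact_mod_cast Nat.succ_le_of_lt hj)
      PySem.Dict.empty
      (by intro k hk; simp [PySem.Dict.keys_empty] at hk)]
  rw [List.map_filterMap]
  simp only [PySem.Dict.empty, List.nil_append, Nat.zero_add]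
  apply List.filterMap_congr
  intro j _
  split_ifs with h
  · simp
  · rfl
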